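-- pv_equiv track=rewrite | github.com/aec03/thinkpython | chapter_13/13.6.py | rand_word_list
-- ===== SOURCE A (Python) =====
-- def rand_word_list(h):
--     t = []
--     k = []
--     for key, value in h.items():
--         if len(t) < 1:
--             t.append(value)
--             k.append(key)
--         else:
--             t.append(value + t[-1])
--             k.append(key)
--
--     return (t, k)
-- ===== SOURCE B (Python) =====
-- def rand_word_list(h):
--     items = list(h.items())
--     total = sum(v for _, v in items)
--     t = []
--     for _, v in reversed(items):
--         t.append(total)
--         total -= v
--     t.reverse()
--     return (t, [key for key, _ in items])
-- ===== Notes on version B (the rewrite author's own statement) =====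
-- stated objective: alternative
-- what changed: Instead of a forward fused loop maintaining a running prefix via t[-1], B first computes the grand total of the values and then walks the items in REVERSE, emitting the current total and subtracting each value, building t back-to-front and reversing it at the end; keys come from a separate comprehension.
import Mathlib
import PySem

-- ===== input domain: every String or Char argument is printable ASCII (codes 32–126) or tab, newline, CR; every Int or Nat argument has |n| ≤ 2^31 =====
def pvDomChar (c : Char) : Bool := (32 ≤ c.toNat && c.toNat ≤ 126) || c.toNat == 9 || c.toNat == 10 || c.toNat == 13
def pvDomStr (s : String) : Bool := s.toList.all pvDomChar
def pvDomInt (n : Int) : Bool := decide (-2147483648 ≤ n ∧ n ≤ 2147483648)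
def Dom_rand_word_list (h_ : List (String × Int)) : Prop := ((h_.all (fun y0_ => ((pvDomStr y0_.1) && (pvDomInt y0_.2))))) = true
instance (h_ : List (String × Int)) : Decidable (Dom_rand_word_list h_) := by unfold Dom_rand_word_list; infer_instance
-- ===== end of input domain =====

-- B replaces A's forward prefix-sum loop (len-guard + t[-1]) by a total-then-reverse-subtraction
-- pass: compute the grand total of the values, walk the items in reverse emitting the running
-- total and subtracting each value, and reverse the built list at the end (alternative; same cost).

-- ===== PORT A =====
-- one loop iteration: append to t (value, or value + t[-1]) and to k
def pvStepA (st : List Int × List String) (p : String × Int) : List Int × List String :=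
  if st.1.length < 1 then (st.1 ++ [p.2], st.2 ++ [p.1])
  else (st.1 ++ [p.2 + st.1.getLast!], st.2 ++ [p.1])
  -- t[-1] ported as getLast!; exact because this branch runs only with t nonempty

def rand_word_list (h_ : List (String × Int)) : List Int × List String :=
  h_.foldl pvStepA ([], [])

-- ===== PORT B =====
-- B's reverse loop body: emit the current running total, then subtract this item's value
def pvStepB (st : Int × List Int) (p : String × Int) : Int × List Int :=
  (st.1 - p.2, st.2 ++ [st.1])

def rand_word_list_alt (h_ : List (String × Int)) : List Int × List String :=
  let total := (h_.map Prod.snd).sum          -- total = sum(v for _, v in items)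
  let st := h_.reverse.foldl pvStepB (total, [])   -- for _, v in reversed(items)
  (st.2.reverse, h_.map Prod.fst)              -- t.reverse(); keys comprehension

-- ===== PRECONDITION & SPEC =====
def Spec_rand_word_list (h_ : List (String × Int)) (out : List Int × List String) : Prop := out = rand_word_list_alt h_
instance (h_ : List (String × Int)) (out : List Int × List String) : Decidable (Spec_rand_word_list h_ out) := by unfold Spec_rand_word_list; infer_instance

-- ===== CLAIM (what is proved, stated in full; the proofs are below) =====
def Claim_equal_rand_word_list : Prop := ∀ (h_ : List (String × Int)), Dom_rand_word_list h_ → Spec_rand_word_list h_ (rand_word_list h_)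

-- ===== LEMMAS AND PROOFS =====
-- running prefix sums starting from s (characterises both ports)
def pvAccum (s : Int) : List Int → List Int
  | [] => []
  | v :: vs => (s + v) :: pvAccum (s + v) vs

-- A's fused loop extends (t, k) with the prefix sums continuing from s = t.getLast!
theorem pv_foldl_inv (h : List (String × Int)) :
    ∀ (t : List Int) (k : List String) (s : Int), t ≠ [] → t.getLast! = s →
      h.foldl pvStepA (t, k) = (t ++ pvAccum s (h.map Prod.snd), k ++ h.map Prod.fst) := by
  induction h with
  | nil => intro t k s _ _; simp [pvAccum]
  | cons p rest ih =>
    intro t k s ht hs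
    have hstep : pvStepA (t, k) p = (t ++ [s + p.2], k ++ [p.1]) := by
      have h1 : t.getLast?.getD 0 = s := by
        simpa [List.getLast!_eq_getLast?_getD, default] using hs
      simp [pvStepA, ht, h1, Int.add_comm]
    have hne : (t ++ [s + p.2]) ≠ [] := by simp
    have hlast : (t ++ [s + p.2]).getLast! = s + p.2 := by
      simp [List.getLast!_eq_getLast?_getD]
    calc (p :: rest).foldl pvStepA (t, k)
        = rest.foldl pvStepA (t ++ [s + p.2], k ++ [p.1]) := by
          simp [List.foldl_cons, hstep]
      _ = (t ++ pvAccum s ((p :: rest).map Prod.snd), k ++ (p :: rest).map Prod.fst) := by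
          rw [ih _ _ _ hne hlast]
          simp [pvAccum]

theorem rand_word_list_eq_accum (h : List (String × Int)) :
    rand_word_list h = (pvAccum 0 (h.map Prod.snd), h.map Prod.fst) := by
  unfold rand_word_list
  cases h with
  | nil => simp [pvAccum]
  | cons p rest =>
    have hstep : pvStepA ([], []) p = ([p.2], [p.1]) := by simp [pvStepA]
    have := pv_foldl_inv rest [p.2] [p.1] p.2 (by simp)
      (by simp [List.getLast!_eq_getLast?_getD])
    simp [List.foldl_cons, hstep, this, pvAccum]

-- B's reverse-subtraction loop, started at s + (sum of l's values), emits the reversed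
-- prefix sums of l continuing from s and ends with running total s
theorem pv_revfold_inv (l : List (String × Int)) :
    ∀ (s : Int) (acc : List Int),
      l.reverse.foldl pvStepB (s + (l.map Prod.snd).sum, acc)
        = (s, acc ++ (pvAccum s (l.map Prod.snd)).reverse) := by
  induction l with
  | nil => intro s acc; simp [pvAccum]
  | cons p rest ih =>
    intro s acc
    have h1 : s + ((p :: rest).map Prod.snd).sum
        = (s + p.2) + (rest.map Prod.snd).sum := by simp; ring
    rw [List.reverse_cons, List.foldl_append, h1, ih (s + p.2) acc]
    simp [pvStepB, pvAccum]

-- ===== VERDICT (by name: the statement is the Claim_ definition above) =====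
theorem rand_word_list_spec : Claim_equal_rand_word_list := by
  intro h_ _
  unfold Spec_rand_word_list rand_word_list_alt
  have hb := pv_revfold_inv h_ 0 []
  rw [zero_add] at hb
  simp only [hb, List.nil_append, List.reverse_reverse]
  exact rand_word_list_eq_accum h_
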